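-- pv_equiv track=rewrite | github.com/jamesagainagain/tribble | backend/src/tribble/services/stream_metrics.py | _build_outcome_histogram
-- ===== SOURCE A (Python) =====
-- def _build_outcome_histogram(jobs: list[dict]) -> dict[str, int]:
--     histogram = {"published": 0, "rejected": 0, "error": 0}
--     for job in jobs:
--         status = str(job.get("status") or "")
--         marker = str(job.get("last_error") or "").lower()
--         if status == "failed":
--             histogram["error"] += 1
--         elif status == "completed" and marker == "rejected":
--             histogram["rejected"] += 1
--         elif status == "completed":
--             histogram["published"] += 1
--     return histogram
-- ===== SOURCE B (Python) =====
-- def _build_outcome_histogram(jobs: list[dict]) -> dict[str, int]: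
--     def status_of(job):
--         return str(job.get("status") or "")
--
--     def marker_of(job):
--         return str(job.get("last_error") or "").lower()
--
--     error = sum(1 for job in jobs if status_of(job) == "failed")
--     rejected = sum(1 for job in jobs
--                    if status_of(job) == "completed" and marker_of(job) == "rejected")
--     published = sum(1 for job in jobs
--                     if status_of(job) == "completed" and marker_of(job) != "rejected")
--     return {"published": published, "rejected": rejected, "error": error}
-- ===== Notes on version B (the rewrite author's own statement) =====
-- stated objective: alternative
-- what changed: Replaces the single branching accumulation loop with three independent counting passes (one generator-sum per histogram bucket, using the mutually exclusive bucket predicates) assembled into the result dict at the end.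
import Mathlib
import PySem

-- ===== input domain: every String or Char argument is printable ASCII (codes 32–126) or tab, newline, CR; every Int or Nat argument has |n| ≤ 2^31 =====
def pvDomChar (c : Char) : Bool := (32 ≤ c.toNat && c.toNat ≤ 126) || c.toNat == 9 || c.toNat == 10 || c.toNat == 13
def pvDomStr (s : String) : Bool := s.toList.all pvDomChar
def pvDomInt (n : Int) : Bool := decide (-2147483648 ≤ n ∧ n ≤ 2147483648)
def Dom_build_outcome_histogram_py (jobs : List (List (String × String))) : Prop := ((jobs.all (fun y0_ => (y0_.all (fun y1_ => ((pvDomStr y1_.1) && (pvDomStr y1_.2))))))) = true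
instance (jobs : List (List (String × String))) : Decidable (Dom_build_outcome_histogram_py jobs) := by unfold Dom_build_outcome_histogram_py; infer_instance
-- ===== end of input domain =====

-- B replaces A's single branching accumulation loop by three independent counting
-- passes, one per histogram bucket (objective: alternative decomposition, same O(n) cost).


-- ===== PORT A =====
-- status = str(job.get("status") or "")  (values are strings, so 'or ""' only replaces a missing key / "" by "")
def pvStatusA (job : List (String × String)) : String :=
  (PySem.Dict.mk job).getD "status" ""

-- marker = str(job.get("last_error") or "").lower()
def pvMarkerA (job : List (String × String)) : String :=
  PySem.Str.lower ((PySem.Dict.mk job).getD "last_error" "")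

-- the loop body: one job updates the running histogram dict
def pvStepA (h : PySem.Dict String Int) (job : List (String × String)) : PySem.Dict String Int :=
  let status := pvStatusA job
  let marker := pvMarkerA job
  if status == "failed" then h.modify "error" 0 (· + 1)
  else if status == "completed" && marker == "rejected" then h.modify "rejected" 0 (· + 1)
  else if status == "completed" then h.modify "published" 0 (· + 1)
  else h

def build_outcome_histogram_py (jobs : List (List (String × String))) : List (String × Int) :=
  let histogram :=
    ((PySem.Dict.empty.insert "published" (0 : Int)).insert "rejected" 0).insert "error" 0
  (jobs.foldl pvStepA histogram).items

-- ===== PORT B =====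
def pvStatusB (job : List (String × String)) : String :=
  (PySem.Dict.mk job).getD "status" ""

def pvMarkerB (job : List (String × String)) : String :=
  PySem.Str.lower ((PySem.Dict.mk job).getD "last_error" "")

def build_outcome_histogram_py_alt (jobs : List (List (String × String))) : List (String × Int) :=
  let error := jobs.countP (fun j => pvStatusB j == "failed")
  let rejected := jobs.countP (fun j => pvStatusB j == "completed" && pvMarkerB j == "rejected")
  let published := jobs.countP (fun j => pvStatusB j == "completed" && pvMarkerB j != "rejected")
  [("published", (published : Int)), ("rejected", (rejected : Int)), ("error", (error : Int))]

-- ===== PRECONDITION & SPEC =====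
def Spec_build_outcome_histogram_py (jobs : List (List (String × String))) (out : List (String × Int)) : Prop := out = build_outcome_histogram_py_alt jobs
instance (jobs : List (List (String × String))) (out : List (String × Int)) : Decidable (Spec_build_outcome_histogram_py jobs out) := by unfold Spec_build_outcome_histogram_py; infer_instance

-- ===== CLAIM (what is proved, stated in full; the proofs are below) =====
def Claim_equal_build_outcome_histogram_py : Prop := ∀ (jobs : List (List (String × String))), Dom_build_outcome_histogram_py jobs → Spec_build_outcome_histogram_py jobs (build_outcome_histogram_py jobs)

-- ===== LEMMAS AND PROOFS =====

-- shorthand for A's loop state: the three-bucket dict with given counts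
def pvHist (p r e : Int) : PySem.Dict String Int :=
  PySem.Dict.mk [("published", p), ("rejected", r), ("error", e)]

lemma pvHist_init :
    ((PySem.Dict.empty.insert "published" (0 : Int)).insert "rejected" 0).insert "error" 0
      = pvHist 0 0 0 := by rfl

lemma pvHist_mod_error (p r e : Int) :
    (pvHist p r e).modify "error" 0 (· + 1) = pvHist p r (e + 1) := by rfl

lemma pvHist_mod_rejected (p r e : Int) :
    (pvHist p r e).modify "rejected" 0 (· + 1) = pvHist p (r + 1) e := by rfl

lemma pvHist_mod_published (p r e : Int) :
    (pvHist p r e).modify "published" 0 (· + 1) = pvHist (p + 1) r e := by rfl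

-- A's step on the three-bucket state, expressed with B's predicates
lemma pvStepA_hist (p r e : Int) (j : List (String × String)) :
    pvStepA (pvHist p r e) j =
      if pvStatusB j == "failed" then pvHist p r (e + 1)
      else if pvStatusB j == "completed" && pvMarkerB j == "rejected" then pvHist p (r + 1) e
      else if pvStatusB j == "completed" then pvHist (p + 1) r e
      else pvHist p r e := by
  unfold pvStepA
  have hs : pvStatusA j = pvStatusB j := rfl
  have hm : pvMarkerA j = pvMarkerB j := rfl
  simp only [hs, hm, pvHist_mod_error, pvHist_mod_rejected, pvHist_mod_published]

-- pvHist is determined by its three counts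
lemma pvHist_eq {p r e p' r' e' : Int} (h1 : p = p') (h2 : r = r') (h3 : e = e') :
    pvHist p r e = pvHist p' r' e' := by rw [h1, h2, h3]

-- the loop invariant: folding A's step over jobs adds B's three per-bucket counts
lemma pvFold_hist (jobs : List (List (String × String))) : ∀ (p r e : Int),
    jobs.foldl pvStepA (pvHist p r e)
      = pvHist (p + jobs.countP (fun j => pvStatusB j == "completed" && pvMarkerB j != "rejected"))
               (r + jobs.countP (fun j => pvStatusB j == "completed" && pvMarkerB j == "rejected"))
               (e + jobs.countP (fun j => pvStatusB j == "failed")) := by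
  induction jobs with
  | nil => intro p r e; simp [List.countP]
  | cons j tl ih =>
    intro p r e
    rw [List.foldl_cons, pvStepA_hist]
    simp only [List.countP_cons]
    cases hf : (pvStatusB j == "failed") with
    | true =>
      have hc : (pvStatusB j == "completed") = false := by
        have h := eq_of_beq hf; simp [h]
      simp only [hc, Bool.false_and, if_true, Bool.false_eq_true, if_false, ih]
      exact pvHist_eq (by push_cast; ring) (by push_cast; ring) (by push_cast; ring)
    | false =>
      cases hc : (pvStatusB j == "completed") with
      | true =>
        cases hr : (pvMarkerB j == "rejected") with
        | true =>
          simp only [hr, Bool.true_and, bne, Bool.not_true, if_true,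
            Bool.false_eq_true, if_false, ih]
          exact pvHist_eq (by push_cast; ring) (by push_cast; ring) (by push_cast; ring)
        | false =>
          simp only [hr, Bool.true_and, bne, Bool.not_false, if_true,
            Bool.false_eq_true, if_false, ih]
          exact pvHist_eq (by push_cast; ring) (by push_cast; ring) (by push_cast; ring)
      | false =>
        simp only [Bool.false_and, Bool.false_eq_true, if_false, ih]
        exact pvHist_eq (by push_cast; ring) (by push_cast; ring) (by push_cast; ring)

-- ===== VERDICT (by name: the statement is the Claim_ definition above) =====
theorem build_outcome_histogram_py_spec : Claim_equal_build_outcome_histogram_py := by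
  intro jobs _
  show build_outcome_histogram_py jobs = build_outcome_histogram_py_alt jobs
  show (List.foldl pvStepA _ jobs).items = _
  rw [pvHist_init, pvFold_hist]
  show (pvHist _ _ _).items = _
  simp only [pvHist, build_outcome_histogram_py_alt, zero_add]
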